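-- pv_equiv track=rewrite | github.com/tachyon-beep/elspeth | src/elspeth/mcp/analyzers/queries.py | _strip_sql_string_literals
-- ===== SOURCE A (Python) =====
-- def _strip_sql_string_literals(sql: str) -> str:
--     """Strip string and quoted-identifier contents from SQL.
--
--     Keeps quote delimiters while dropping inner content so keyword checks
--     do not flag words that only appear inside quoted values/identifiers.
--     """
--     out: list[str] = []
--     i = 0
--     n = len(sql)
--     in_single_quote = False
--     in_double_quote = False
--
--     while i < n:
--         ch = sql[i]
--         nxt = sql[i + 1] if i + 1 < n else ""
--
--         if in_single_quote:
--             if ch == "'":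
--                 out.append(ch)
--                 if nxt == "'":
--                     out.append(nxt)
--                     i += 2
--                     continue
--                 in_single_quote = False
--             i += 1
--             continue
--
--         if in_double_quote:
--             if ch == '"':
--                 out.append(ch)
--                 if nxt == '"':
--                     out.append(nxt)
--                     i += 2
--                     continue
--                 in_double_quote = False
--             i += 1
--             continue
--
--         if ch == "'":
--             in_single_quote = True
--             out.append(ch)
--             i += 1
--             continue
--
--         if ch == '"':
--             in_double_quote = True
--             out.append(ch)
--             i += 1
--             continue
--
--         out.append(ch)
--         i += 1
--
--     return "".join(out)
-- ===== SOURCE B (Python) =====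
-- def _strip_sql_string_literals(sql: str) -> str:
--     """Strip string and quoted-identifier contents from SQL.
--
--     Instead of a char-by-char state machine, jump from quote to quote with
--     str.find and copy/drop whole segments at once.
--     """
--     out: list[str] = []
--     rest = sql
--     while True:
--         ia = rest.find("'")
--         ib = rest.find('"')
--         if ia == -1 and ib == -1:
--             out.append(rest)
--             return "".join(out)
--         i = ia if ib == -1 or (ia != -1 and ia < ib) else ib
--         q = rest[i]
--         out.append(rest[: i + 1])
--         rest = rest[i + 1 :]
--         # inside a q-quoted literal: keep only q characters, drop the content
--         while True:
--             k = rest.find(q)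
--             if k == -1:
--                 rest = ""
--                 break
--             if rest[k + 1 : k + 2] == q:
--                 out.append(q + q)
--                 rest = rest[k + 2 :]
--             else:
--                 out.append(q)
--                 rest = rest[k + 1 :]
--                 break
-- ===== Notes on version B (the rewrite author's own statement) =====
-- stated objective: faster
-- what changed: Replaces the char-by-char loop with two boolean in-quote flags by segment jumping: str.find locates the next quote (or closing/doubled quote) at C speed, and whole slices are copied or dropped at once instead of per-character Python iteration.
import Mathlib
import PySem

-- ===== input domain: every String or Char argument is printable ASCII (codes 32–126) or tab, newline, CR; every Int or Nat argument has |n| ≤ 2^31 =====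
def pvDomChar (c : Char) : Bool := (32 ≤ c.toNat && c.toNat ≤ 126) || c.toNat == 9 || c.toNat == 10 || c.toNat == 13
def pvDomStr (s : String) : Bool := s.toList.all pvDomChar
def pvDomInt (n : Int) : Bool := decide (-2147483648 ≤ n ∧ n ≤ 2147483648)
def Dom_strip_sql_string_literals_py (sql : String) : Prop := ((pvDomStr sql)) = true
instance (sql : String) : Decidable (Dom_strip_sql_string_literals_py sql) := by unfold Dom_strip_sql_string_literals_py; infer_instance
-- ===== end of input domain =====

-- B replaces A's char-by-char two-flag state machine by find-and-slice segment jumping (measured faster; return value proved equal).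


-- ===== PORT A =====
-- A's while loop over (i, in_single_quote, in_double_quote, out), as structural recursion
-- over the remaining characters with the same two flags; appends to `out` become conses.
def loopA : List Char → Bool → Bool → List Char
  | [], _, _ => []
  | [c], sq, dq =>
    if sq then (if c = '\'' then [c] else [])
    else if dq then (if c = '"' then [c] else [])
    else [c]
  | c :: d :: rest, sq, dq =>
    if sq then
      if c = '\'' then
        if d = '\'' then c :: d :: loopA rest sq dq
        else c :: loopA (d :: rest) false dq
      else loopA (d :: rest) sq dq
    else if dq then
      if c = '"' then
        if d = '"' then c :: d :: loopA rest sq dq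
        else c :: loopA (d :: rest) sq false
      else loopA (d :: rest) sq dq
    else if c = '\'' then c :: loopA (d :: rest) true dq
    else if c = '"' then c :: loopA (d :: rest) sq true
    else c :: loopA (d :: rest) sq dq


def strip_sql_string_literals_py (sql : String) : String :=
  String.mk (loopA sql.toList false false)

-- ===== PORT B =====

-- 0 ≤ find, and find points inside the list, when find ≠ -1 (used for termination)
theorem find_pos_facts (s : List Char) (a : Char) (h : PySem.Chars.find s [a] ≠ -1) :
    0 ≤ PySem.Chars.find s [a] ∧ (PySem.Chars.find s [a]).toNat < s.length := by
  have h0 : (0:Int) ≤ PySem.Chars.find s [a] := by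
    have := PySem.Chars.neg_one_le_find s [a]; omega
  obtain ⟨hpre, -⟩ := PySem.Chars.find_spec h0
  have hne : s.drop (PySem.Chars.find s [a]).toNat ≠ [] := by
    intro he; rw [he] at hpre; simp at hpre
  have hlen : 0 < (s.drop (PySem.Chars.find s [a]).toNat).length := List.length_pos_of_ne_nil hne
  simp only [List.length_drop] at hlen
  omega

-- i = ia if ib == -1 or (ia != -1 and ia < ib) else ib
def pickIdx (ia ib : Int) : Int := if ib = -1 ∨ (ia ≠ -1 ∧ ia < ib) then ia else ib

theorem pickIdx_nonneg (ia ib : Int) (ha : -1 ≤ ia) (hb : -1 ≤ ib)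
    (h : ¬(ia = -1 ∧ ib = -1)) : 0 ≤ pickIdx ia ib := by
  unfold pickIdx; split_ifs with hc
  · rcases hc with hc | hc <;> omega
  · simp only [not_or, not_and, not_lt] at hc; omega

mutual
def altOutside (rest : List Char) : List Char :=
  let ia := PySem.Chars.find rest ['\'']
  let ib := PySem.Chars.find rest ['"']
  if h : ia = -1 ∧ ib = -1 then rest
  else
    let i := pickIdx ia ib
    match PySem.List.pyGet? rest i with
    | none => []  -- unreachable: i is a valid index into rest
    | some q =>
        PySem.List.slice rest none (some (i+1)) ++
          altInside q (PySem.List.slice rest (some (i+1)) none)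
termination_by rest.length
decreasing_by
  have hi : 0 ≤ pickIdx (PySem.Chars.find rest ['\'']) (PySem.Chars.find rest ['"']) :=
    pickIdx_nonneg _ _ (PySem.Chars.neg_one_le_find _ _) (PySem.Chars.neg_one_le_find _ _) h
  have hlen : 0 < rest.length := by
    by_cases hia : PySem.Chars.find rest ['\''] = -1
    · have := (find_pos_facts rest '"' (by tauto)).2; omega
    · have := (find_pos_facts rest '\'' hia).2; omega
  have hs := PySem.List.slice_from (xs := rest)
    (a := pickIdx (PySem.Chars.find rest ['\'']) (PySem.Chars.find rest ['"']) + 1) (by omega)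
  rw [hs]
  simp only [List.length_drop]
  omega

def altInside (q : Char) (rest : List Char) : List Char :=
  let k := PySem.Chars.find rest [q]
  if hk : k = -1 then []
  else if PySem.List.slice rest (some (k+1)) (some (k+2)) = [q] then
    [q, q] ++ altInside q (PySem.List.slice rest (some (k+2)) none)
  else
    [q] ++ altOutside (PySem.List.slice rest (some (k+1)) none)
termination_by rest.length
decreasing_by
  · have h1 := (find_pos_facts rest q hk).1
    have h2 := (find_pos_facts rest q hk).2
    have hs := PySem.List.slice_from (xs := rest) (a := PySem.Chars.find rest [q] + 2) (by omega)
    rw [hs]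
    simp only [List.length_drop]
    omega
  · have h1 := (find_pos_facts rest q hk).1
    have h2 := (find_pos_facts rest q hk).2
    have hs := PySem.List.slice_from (xs := rest) (a := PySem.Chars.find rest [q] + 1) (by omega)
    rw [hs]
    simp only [List.length_drop]
    omega
end



def strip_sql_string_literals_py_alt (sql : String) : String :=
  String.mk (altOutside sql.toList)

-- ===== PRECONDITION & SPEC =====
def Spec_strip_sql_string_literals_py (sql : String) (out : String) : Prop := out = strip_sql_string_literals_py_alt sql
instance (sql : String) (out : String) : Decidable (Spec_strip_sql_string_literals_py sql out) := by unfold Spec_strip_sql_string_literals_py; infer_instance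

-- ===== CLAIM (what is proved, stated in full; the proofs are below) =====
def Claim_equal_strip_sql_string_literals_py : Prop := ∀ (sql : String), Dom_strip_sql_string_literals_py sql → Spec_strip_sql_string_literals_py sql (strip_sql_string_literals_py sql)

-- ===== LEMMAS AND PROOFS =====
theorem find_singleton_cons (a c : Char) (s : List Char) :
    PySem.Chars.find (c :: s) [a] =
      if c = a then 0
      else (if PySem.Chars.find s [a] = -1 then -1 else PySem.Chars.find s [a] + 1) := by
  by_cases hca : c = a
  · subst hca
    have hinf : [c] <:+: (c :: s) := by rw [List.singleton_infix_iff]; simp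
    have h0 : (0:Int) <= PySem.Chars.find (c :: s) [c] :=
      (PySem.Chars.find_nonneg_iff _ _).mpr hinf
    obtain ⟨hpre, hmin⟩ := PySem.Chars.find_spec h0
    have ht : (PySem.Chars.find (c :: s) [c]).toNat = 0 := by
      by_contra hne
      exact hmin 0 (Nat.pos_of_ne_zero hne) (by simp [List.cons_prefix_cons])
    rw [if_pos rfl]
    omega
  · by_cases hr : PySem.Chars.find s [a] = -1
    · have hna : ¬ [a] <:+: s := (PySem.Chars.find_eq_neg_one_iff _ _).mp hr
      rw [List.singleton_infix_iff] at hna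
      have : ¬ [a] <:+: (c :: s) := by
        rw [List.singleton_infix_iff]; simp [Ne.symm hca, hna]
      simp only [hca, hr, if_false, if_true]
      exact (PySem.Chars.find_eq_neg_one_iff _ _).mpr this
    · have h0s : (0:Int) ≤ PySem.Chars.find s [a] := by
        have := PySem.Chars.neg_one_le_find s [a]; omega
      obtain ⟨hpre_s, hmin_s⟩ := PySem.Chars.find_spec h0s
      set r := PySem.Chars.find s [a] with hrdef
      have hmem : a ∈ s := by
        have := (PySem.Chars.find_nonneg_iff s [a]).mp h0s
        rwa [List.singleton_infix_iff] at this
      have hinf : [a] <:+: (c :: s) := by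
        rw [List.singleton_infix_iff]; simp [hmem]
      have h0 : (0:Int) ≤ PySem.Chars.find (c :: s) [a] :=
        (PySem.Chars.find_nonneg_iff _ _).mpr hinf
      obtain ⟨hpre, hmin⟩ := PySem.Chars.find_spec h0
      set f := PySem.Chars.find (c :: s) [a] with hfdef
      have hf0 : f.toNat ≠ 0 := by
        intro h
        rw [h] at hpre
        simp [List.cons_prefix_cons] at hpre
        exact hca hpre.symm
      obtain ⟨m, hm⟩ : ∃ m, f.toNat = m + 1 := ⟨f.toNat - 1, by omega⟩
      have hpre_m : [a] <+: s.drop m := by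
        have := hpre; rw [hm, List.drop_succ_cons] at this; exact this
      have hle1 : r.toNat ≤ m := by
        by_contra hlt
        exact hmin_s m (by omega) hpre_m
      have hle2 : f.toNat ≤ r.toNat + 1 := by
        by_contra hlt
        exact hmin (r.toNat + 1) (by omega) (by rw [List.drop_succ_cons]; exact hpre_s)
      simp only [hca, hr, if_false]
      omega

theorem find_singleton_nil (a : Char) : PySem.Chars.find [] [a] = -1 := by
  apply (PySem.Chars.find_eq_neg_one_iff _ _).mpr
  rw [List.singleton_infix_iff]; simp

theorem altOutside_nil : altOutside [] = [] := by
  rw [altOutside]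
  simp [find_singleton_nil]

theorem altInside_nil (q : Char) : altInside q [] = [] := by
  rw [altInside]
  simp [find_singleton_nil]

theorem pyGet?_cons_zero (c : Char) (s : List Char) : PySem.List.pyGet? (c::s) (0:Int) = some c := by
  simp only [PySem.List.pyGet?, PySem.List.pyIdx?]
  norm_num

theorem pyGet?_cons_succ (c : Char) (s : List Char) (n : Int) (h : 0 ≤ n) :
    PySem.List.pyGet? (c::s) (n+1) = PySem.List.pyGet? s n := by
  simp only [PySem.List.pyGet?, PySem.List.pyIdx?, List.length_cons, Nat.cast_add, Nat.cast_one,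
    Order.lt_add_one_iff, Order.add_one_le_iff, neg_add_rev, Int.reduceNeg, add_neg_le_iff_le_add]
  have ht : (n+1).toNat = n.toNat + 1 := by omega
  split_ifs with h1 h2 <;> simp_all <;> omega


theorem slice_take1 (c : Char) (s : List Char) :
    PySem.List.slice (c::s) none (some (1:Int)) = [c] := by
  have h := PySem.List.slice_to (xs := c::s) (b := (1:Int)) (by omega)
  rw [h]; rfl

theorem slice_drop1 (c : Char) (s : List Char) :
    PySem.List.slice (c::s) (some (1:Int)) = s := by
  have h := PySem.List.slice_from (xs := c::s) (a := (1:Int)) (by omega)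
  rw [h]; rfl

theorem altOutside_cons_sq (s : List Char) :
    altOutside ('\'' :: s) = '\'' :: altInside '\'' s := by
  rw [altOutside]
  simp only [find_singleton_cons]
  norm_num
  have hb := PySem.Chars.neg_one_le_find s ['"']
  have hpk : pickIdx 0 (if PySem.Chars.find s ['"'] = -1 then -1 else PySem.Chars.find s ['"'] + 1) = 0 := by
    unfold pickIdx; split_ifs <;> omega
  rw [if_neg (by decide : ¬ ('\'' : Char) = '"')]
  rw [hpk, pyGet?_cons_zero]
  norm_num [slice_take1, slice_drop1]

theorem slice_from_cons (c : Char) (s : List Char) (m : Int) (h : 0 ≤ m) :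
    PySem.List.slice (c::s) (some (m+1)) = PySem.List.slice s (some m) := by
  rw [PySem.List.slice_from (xs := c::s) (a := m+1) (by omega),
      PySem.List.slice_from (xs := s) (a := m) h]
  have hm : (m+1).toNat = m.toNat + 1 := by omega
  rw [hm, List.drop_succ_cons]

theorem slice_to_cons (c : Char) (s : List Char) (m : Int) (h : 0 ≤ m) :
    PySem.List.slice (c::s) none (some (m+1)) = c :: PySem.List.slice s none (some m) := by
  rw [PySem.List.slice_to (xs := c::s) (b := m+1) (by omega),
      PySem.List.slice_to (xs := s) (b := m) h]
  have hm : (m+1).toNat = m.toNat + 1 := by omega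
  rw [hm, List.take_succ_cons]

theorem slice_pair_cons (c : Char) (s : List Char) (a b : Int) (ha : 0 ≤ a) (hb : 0 ≤ b) :
    PySem.List.slice (c::s) (some (a+1)) (some (b+1)) = PySem.List.slice s (some a) (some b) := by
  rw [PySem.List.slice_toNat (xs := c::s) (by omega) (by omega),
      PySem.List.slice_toNat (xs := s) ha hb]
  have h1 : (a+1).toNat = a.toNat + 1 := by omega
  have h2 : (b+1).toNat = b.toNat + 1 := by omega
  rw [h1, h2, List.drop_succ_cons, Nat.add_sub_add_right]

theorem altOutside_cons_dq (s : List Char) :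
    altOutside ('"' :: s) = '"' :: altInside '"' s := by
  rw [altOutside]
  simp only [find_singleton_cons]
  rw [if_neg (by decide : ¬ ('"' : Char) = '\'')]
  norm_num
  have ha := PySem.Chars.neg_one_le_find s ['\'']
  have hpk : pickIdx (if PySem.Chars.find s ['\''] = -1 then -1 else PySem.Chars.find s ['\''] + 1) 0 = 0 := by
    by_cases hf : PySem.Chars.find s ['\''] = -1
    · rw [if_pos hf]; unfold pickIdx
      rw [if_neg (by rintro (h1 | ⟨h1, h2⟩) <;> omega)]
    · rw [if_neg hf]; unfold pickIdx
      rw [if_neg (by rintro (h1 | ⟨h1, h2⟩) <;> omega)]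
  rw [hpk, pyGet?_cons_zero]
  norm_num [slice_take1, slice_drop1]

theorem pickIdx_cases (fa fb : Int) : pickIdx fa fb = fa ∨ pickIdx fa fb = fb := by
  unfold pickIdx; split_ifs <;> simp

theorem pickIdx_shift (fa fb : Int) (ha : -1 ≤ fa) (hb : -1 ≤ fb) (h : ¬(fa = -1 ∧ fb = -1)) :
    pickIdx (if fa = -1 then -1 else fa+1) (if fb = -1 then -1 else fb+1) = pickIdx fa fb + 1 := by
  unfold pickIdx
  by_cases hfa : fa = -1 <;> by_cases hfb : fb = -1
  · exact absurd ⟨hfa, hfb⟩ h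
  · rw [if_pos hfa, if_neg hfb]
    rw [if_neg (by rintro (h1 | ⟨h1, h2⟩) <;> omega),
        if_neg (by rintro (h1 | ⟨h1, h2⟩) <;> omega)]
  · rw [if_neg hfa, if_pos hfb]
    rw [if_pos (by left; omega), if_pos (by left; exact hfb)]
  · rw [if_neg hfa, if_neg hfb]
    by_cases hlt : fa < fb
    · rw [if_pos (by right; exact ⟨by omega, by omega⟩),
          if_pos (by right; exact ⟨hfa, hlt⟩)]
    · rw [if_neg (by rintro (h1 | ⟨h1, h2⟩) <;> omega),
          if_neg (by rintro (h1 | ⟨h1, h2⟩) <;> omega)]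

theorem pyGet?_total (s : List Char) (n : Int) (h0 : 0 ≤ n) (h : n.toNat < s.length) :
    ∃ x, PySem.List.pyGet? s n = some x := by
  refine ⟨s[n.toNat], ?_⟩
  simp only [PySem.List.pyGet?, PySem.List.pyIdx?]
  rw [if_pos h0, if_pos (by omega)]
  simp [List.getElem?_eq_getElem h]

theorem altOutside_cons_other (c : Char) (s : List Char) (h1 : ¬ c = '\'') (h2 : ¬ c = '"') :
    altOutside (c :: s) = c :: altOutside s := by
  rw [altOutside]
  conv_rhs => rw [altOutside]
  simp only [find_singleton_cons, if_neg h1, if_neg h2]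
  have ha := PySem.Chars.neg_one_le_find s ['\'']
  have hb := PySem.Chars.neg_one_le_find s ['"']
  by_cases hne : PySem.Chars.find s ['\''] = -1 ∧ PySem.Chars.find s ['"'] = -1
  · rw [dif_pos (by constructor <;> simp [hne.1, hne.2]), dif_pos hne]
  · rw [dif_neg (by
      rintro ⟨hx, hy⟩
      split_ifs at hx hy <;> omega), dif_neg hne]
    rw [pickIdx_shift _ _ ha hb hne]
    have hp0 : 0 ≤ pickIdx (PySem.Chars.find s ['\'']) (PySem.Chars.find s ['"']) :=
      pickIdx_nonneg _ _ ha hb hne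
    have hplen : (pickIdx (PySem.Chars.find s ['\'']) (PySem.Chars.find s ['"'])).toNat < s.length := by
      rcases pickIdx_cases (PySem.Chars.find s ['\'']) (PySem.Chars.find s ['"']) with hp | hp
      · have := (find_pos_facts s '\'' (by omega)).2; omega
      · have := (find_pos_facts s '"' (by omega)).2; omega
    obtain ⟨q, hq⟩ := pyGet?_total s _ hp0 hplen
    rw [pyGet?_cons_succ _ _ _ hp0, hq]
    rw [slice_to_cons _ _ _ (by omega), slice_from_cons _ _ _ (by omega)]
    simp

theorem altInside_skip (q c : Char) (s : List Char) (h : ¬ c = q) :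
    altInside q (c :: s) = altInside q s := by
  rw [altInside]
  conv_rhs => rw [altInside]
  simp only [find_singleton_cons, if_neg h]
  by_cases hk : PySem.Chars.find s [q] = -1
  · rw [dif_pos (by simp [hk]), dif_pos hk]
  · have h0 : 0 ≤ PySem.Chars.find s [q] := by
      have := PySem.Chars.neg_one_le_find s [q]; omega
    rw [dif_neg (by split_ifs <;> omega), dif_neg hk]
    rw [if_neg hk]
    have e2 : PySem.Chars.find s [q] + 1 + 2 = (PySem.Chars.find s [q] + 2) + 1 := by ring
    rw [e2, slice_pair_cons _ _ _ _ (by omega) (by omega)]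
    rw [slice_from_cons _ _ (PySem.Chars.find s [q] + 2) (by omega)]
    rw [slice_from_cons _ _ (PySem.Chars.find s [q] + 1) (by omega)]

theorem slice_12 (c : Char) (s : List Char) :
    PySem.List.slice (c::s) (some (1:Int)) (some (2:Int)) = s.take 1 := by
  rw [PySem.List.slice_toNat (xs := c::s) (by omega) (by omega)]
  rfl

theorem slice_drop2 (c d : Char) (s : List Char) :
    PySem.List.slice (c::d::s) (some (2:Int)) = s := by
  rw [PySem.List.slice_from (xs := c::d::s) (a := (2:Int)) (by omega)]
  rfl

theorem altInside_open_nil (q : Char) : altInside q [q] = [q] := by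
  rw [altInside]
  simp only [find_singleton_cons]
  rw [dif_neg (by norm_num)]
  norm_num [slice_12, slice_drop1, altOutside_nil]

theorem altInside_open_esc (q : Char) (s : List Char) :
    altInside q (q :: q :: s) = q :: q :: altInside q s := by
  rw [altInside]
  simp only [find_singleton_cons]
  rw [dif_neg (by norm_num)]
  norm_num [slice_12, slice_drop2]

theorem altInside_open_close (q d : Char) (s : List Char) (h : ¬ d = q) :
    altInside q (q :: d :: s) = q :: altOutside (d :: s) := by
  rw [altInside]
  simp only [find_singleton_cons]
  rw [dif_neg (by norm_num)]
  norm_num [slice_12, slice_drop1]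
  exact fun he => absurd he h

theorem loopA_eq (n : Nat) : ∀ s : List Char, s.length ≤ n →
    loopA s false false = altOutside s ∧
    loopA s true false = altInside '\'' s ∧
    loopA s false true = altInside '"' s := by
  induction n with
  | zero =>
    intro s hs
    have hnil : s = [] := by cases s <;> simp_all
    subst hnil
    simp [loopA, altOutside_nil, altInside_nil]
  | succ n ih =>
    intro s hs
    cases s with
    | nil => simp [loopA, altOutside_nil, altInside_nil]
    | cons c t =>
      have ht : t.length ≤ n := by simp at hs; omega
      refine ⟨?_, ?_, ?_⟩
      · by_cases h1 : c = '\''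
        · subst h1
          have hl : loopA ('\'' :: t) false false = '\'' :: loopA t true false := by
            cases t <;> simp [loopA]
          rw [hl, (ih t ht).2.1, altOutside_cons_sq]
        · by_cases h2 : c = '"'
          · subst h2
            have hl : loopA ('"' :: t) false false = '"' :: loopA t false true := by
              cases t <;> simp [loopA]
            rw [hl, (ih t ht).2.2, altOutside_cons_dq]
          · have hl : loopA (c :: t) false false = c :: loopA t false false := by
              cases t <;> simp [loopA, h1, h2]
            rw [hl, (ih t ht).1, altOutside_cons_other c t h1 h2]
      · by_cases h1 : c = '\''
        · subst h1
          cases t with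
          | nil => simp [loopA, altInside_open_nil]
          | cons d t2 =>
            by_cases h2 : d = '\''
            · subst h2
              have hl : loopA ('\'' :: '\'' :: t2) true false
                  = '\'' :: '\'' :: loopA t2 true false := by simp [loopA]
              have ht2 : t2.length ≤ n := by simp at hs; omega
              rw [hl, (ih t2 ht2).2.1, altInside_open_esc]
            · have hl : loopA ('\'' :: d :: t2) true false
                  = '\'' :: loopA (d :: t2) false false := by simp [loopA, h2]
              rw [hl, (ih (d :: t2) ht).1, altInside_open_close _ _ _ h2]
        · have hl : loopA (c :: t) true false = loopA t true false := by
            cases t <;> simp [loopA, h1]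
          rw [hl, (ih t ht).2.1, altInside_skip _ _ _ h1]
      · by_cases h1 : c = '"'
        · subst h1
          cases t with
          | nil => simp [loopA, altInside_open_nil]
          | cons d t2 =>
            by_cases h2 : d = '"'
            · subst h2
              have hl : loopA ('"' :: '"' :: t2) false true
                  = '"' :: '"' :: loopA t2 false true := by simp [loopA]
              have ht2 : t2.length ≤ n := by simp at hs; omega
              rw [hl, (ih t2 ht2).2.2, altInside_open_esc]
            · have hl : loopA ('"' :: d :: t2) false true
                  = '"' :: loopA (d :: t2) false false := by simp [loopA, h2]
              rw [hl, (ih (d :: t2) ht).1, altInside_open_close _ _ _ h2]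
        · have hl : loopA (c :: t) false true = loopA t false true := by
            cases t <;> simp [loopA, h1]
          rw [hl, (ih t ht).2.2, altInside_skip _ _ _ h1]

-- ===== VERDICT (by name: the statement is the Claim_ definition above) =====
theorem strip_sql_string_literals_py_spec : Claim_equal_strip_sql_string_literals_py := by
  intro sql _
  unfold Spec_strip_sql_string_literals_py strip_sql_string_literals_py strip_sql_string_literals_py_alt
  exact congrArg String.mk (loopA_eq sql.toList.length sql.toList le_rfl).1
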